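-- pv_equiv track=rewrite | github.com/vtkndrew/large_xls_py | v1.py | get_inserted_rows_set
-- ===== SOURCE A (Python) =====
-- from typing import Dict, List, Tuple, Any
--
-- def get_inserted_rows_set(row_shift_map: Dict[int, int]) -> set:
--     """
--     Возвращает множество номеров вставленных строк.
--
--     Пример:
--         row_shift_map = {5: 3, 10: 2}
--         Result: {6, 7, 8, 14, 15}  (с учётом смещения)
--
--     Args:
--         row_shift_map: карта вставок
--
--     Returns:
--         Множество номеров вставленных строк
--     """
--     inserted_rows = set()
--     cumulative = 0
--
--     for row_num in sorted(row_shift_map.keys()):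
--         count = row_shift_map[row_num]
--         # Строка row_num сдвинута на cumulative
--         actual_position = row_num + cumulative
--
--         # Вставленные строки идут сразу после actual_position
--         for i in range(1, count + 1):
--             inserted_rows.add(actual_position + i)
--
--         cumulative += count
--
--     return inserted_rows
-- ===== SOURCE B (Python) =====
-- def get_inserted_rows_set(row_shift_map):
--     # Divide and conquer over the sorted keys: emit the left half, then the
--     # right half with its base shift raised by the left half's total count.
--     # No running cumulative accumulator is threaded through a loop.
--     def rows(keys, base):
--         if not keys:
--             return []
--         if len(keys) == 1:
--             pos = keys[0] + base
--             return list(range(pos + 1, pos + row_shift_map[keys[0]] + 1))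
--         mid = len(keys) // 2
--         left, right = keys[:mid], keys[mid:]
--         return rows(left, base) + \
--                rows(right, base + sum(row_shift_map[k] for k in left))
--     return set(rows(sorted(row_shift_map), 0))
-- ===== Notes on version B (the rewrite author's own statement) =====
-- stated objective: alternative
-- what changed: Replaces A's single forward loop threading a running cumulative accumulator with a divide-and-conquer recursion over the sorted keys: the left half is emitted with the current base shift, the right half with the base raised by the left half's total count, and the collected row list is turned into a set at the end.
import Mathlib
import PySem

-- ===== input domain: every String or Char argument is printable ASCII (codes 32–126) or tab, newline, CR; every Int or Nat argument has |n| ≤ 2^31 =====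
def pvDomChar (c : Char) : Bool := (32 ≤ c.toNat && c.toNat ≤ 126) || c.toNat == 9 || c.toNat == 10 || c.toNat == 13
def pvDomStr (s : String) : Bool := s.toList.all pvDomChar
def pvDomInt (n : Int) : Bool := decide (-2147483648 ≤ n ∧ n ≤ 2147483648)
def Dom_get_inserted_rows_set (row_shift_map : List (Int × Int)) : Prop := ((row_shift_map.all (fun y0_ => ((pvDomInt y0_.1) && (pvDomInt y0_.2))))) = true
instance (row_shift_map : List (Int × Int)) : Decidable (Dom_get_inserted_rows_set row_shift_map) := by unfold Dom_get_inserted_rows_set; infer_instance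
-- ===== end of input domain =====

-- B computes the same set by divide and conquer on the sorted key list — left half at the
-- current base shift, right half at the base raised by the left half's total count — instead
-- of A's forward loop threading a cumulative accumulator; objective: alternative, no speed claim.


-- ===== PORT A =====
def get_inserted_rows_set (row_shift_map : List (Int × Int)) : List Int :=
  let d := PySem.Dict.ofList row_shift_map
  (((PySem.List.sorted d.keys (fun x => x) false).foldl
      (fun (st : PySem.Set Int × Int) row_num =>
        let count := d.getD row_num 0
        let actual_position := row_num + st.2
        ((PySem.List.pyRange 1 (count + 1) 1).foldl
            (fun s i => PySem.Set.add s (actual_position + i)) st.1,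
         st.2 + count))
      (PySem.Set.empty, 0))).1

-- ===== PORT B =====
-- rows(keys, base): divide and conquer on the key list (termination by length)
def pvRowsB (d : PySem.Dict Int Int) (keys : List Int) (base : Int) : List Int :=
  match keys with
  | [] => []
  | [k] =>
      let pos := k + base
      PySem.List.pyRange (pos + 1) (pos + d.getD k 0 + 1) 1
  | a :: b :: t =>
      let mid := (a :: b :: t).length / 2
      let left := (a :: b :: t).take mid
      let right := (a :: b :: t).drop mid
      pvRowsB d left base ++
        pvRowsB d right (base + left.foldl (fun s k => s + d.getD k 0) 0)
  termination_by keys.length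
  decreasing_by
  · simp [List.length_take]; omega
  · simp [List.length_drop]; omega

def get_inserted_rows_set_alt (row_shift_map : List (Int × Int)) : List Int :=
  let d := PySem.Dict.ofList row_shift_map
  PySem.Set.ofList (pvRowsB d (PySem.List.sorted d.keys (fun x => x) false) 0)

-- ===== PRECONDITION & SPEC =====
def Spec_get_inserted_rows_set (row_shift_map : List (Int × Int)) (out : List Int) : Prop := out = get_inserted_rows_set_alt row_shift_map
instance (row_shift_map : List (Int × Int)) (out : List Int) : Decidable (Spec_get_inserted_rows_set row_shift_map out) := by unfold Spec_get_inserted_rows_set; infer_instance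

-- ===== CLAIM (what is proved, stated in full; the proofs are below) =====
def Claim_equal_get_inserted_rows_set : Prop := ∀ (row_shift_map : List (Int × Int)), Dom_get_inserted_rows_set row_shift_map → Spec_get_inserted_rows_set row_shift_map (get_inserted_rows_set row_shift_map)

-- ===== LEMMAS AND PROOFS =====

-- the flat list of rows A inserts for keys l, starting at cumulative shift c
def pvEmit (g : Int → Int) : List Int → Int → List Int
  | [], _ => []
  | k :: t, c =>
      PySem.List.pyRange (k + c + 1) (k + c + g k + 1) 1 ++ pvEmit g t (c + g k)

theorem pvRange_shift (a n : Int) :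
    (PySem.List.pyRange 1 (n + 1) 1).map (fun i => a + i)
      = PySem.List.pyRange (a + 1) (a + n + 1) 1 := by
  rw [PySem.List.pyRange_one, PySem.List.pyRange_one, List.map_map]
  have : (n + 1 - 1).toNat = (a + n + 1 - (a + 1)).toNat := by omega
  rw [this]
  exact List.map_congr_left (fun k _ => by simp [Function.comp]; ring)

-- A's inner loop adds exactly the shifted range
theorem pvInner (s : PySem.Set Int) (a n : Int) :
    (PySem.List.pyRange 1 (n + 1) 1).foldl (fun s i => PySem.Set.add s (a + i)) s
      = PySem.Set.update s (PySem.List.pyRange (a + 1) (a + n + 1) 1) := by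
  rw [PySem.Set.update, ← pvRange_shift, List.foldl_map]

-- A's outer loop is Set.update with the emitted list
theorem pvAfold (g : Int → Int) (l : List Int) (s : PySem.Set Int) (c : Int) :
    (l.foldl
        (fun (st : PySem.Set Int × Int) k =>
          ((PySem.List.pyRange 1 (g k + 1) 1).foldl
              (fun s i => PySem.Set.add s (k + st.2 + i)) st.1,
           st.2 + g k)) (s, c)).1
      = PySem.Set.update s (pvEmit g l c) := by
  induction l generalizing s c with
  | nil => simp [pvEmit, PySem.Set.update]
  | cons k t ih =>
      simp only [List.foldl_cons, pvEmit]
      rw [ih, pvInner]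
      simp [PySem.Set.update, List.foldl_append]

-- splitting the key list: the right part's emission starts at the raised shift
theorem pvEmit_append (g : Int → Int) (l1 l2 : List Int) (c : Int) :
    pvEmit g (l1 ++ l2) c
      = pvEmit g l1 c ++ pvEmit g l2 (c + (l1.map g).sum) := by
  induction l1 generalizing c with
  | nil => simp [pvEmit]
  | cons a t ih =>
      simp only [List.cons_append, pvEmit, ih, List.map_cons, List.sum_cons,
        List.append_assoc]
      ring_nf

theorem pvFoldl_sum (g : Int → Int) (l : List Int) :
    l.foldl (fun s k => s + g k) 0 = (l.map g).sum := by
  rw [← List.foldl_map, List.sum_eq_foldl]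

-- B's divide-and-conquer produces exactly A's emitted list
theorem pvRowsB_eq (d : PySem.Dict Int Int) (l : List Int) (c : Int) :
    pvRowsB d l c = pvEmit (fun k => d.getD k 0) l c := by
  induction hn : l.length using Nat.strong_induction_on generalizing l c with
  | _ n ih =>
    match l with
    | [] => simp [pvRowsB, pvEmit]
    | [k] => simp [pvRowsB, pvEmit]
    | a :: b :: t =>
      rw [pvRowsB]
      have hlen : (a :: b :: t).length = n := hn
      have hmid : ((a :: b :: t).length / 2) < n ∧ 1 ≤ (a :: b :: t).length / 2 := by
        simp at hlen ⊢; omega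
      rw [ih _ (by rw [← hn]; simp [List.length_take]; omega) _ _ rfl,
          ih _ (by rw [← hn]; simp [List.length_drop]; omega) _ _ rfl,
          pvFoldl_sum]
      conv_rhs => rw [← List.take_append_drop ((a :: b :: t).length / 2) (a :: b :: t)]
      rw [pvEmit_append]

-- ===== VERDICT (by name: the statement is the Claim_ definition above) =====
theorem get_inserted_rows_set_spec : Claim_equal_get_inserted_rows_set := by
  intro m _
  unfold Spec_get_inserted_rows_set get_inserted_rows_set get_inserted_rows_set_alt
  simp only []
  rw [pvRowsB_eq, pvAfold (fun k => (PySem.Dict.ofList m).getD k 0)]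
  rfl
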